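-- pv_equiv track=rewrite | github.com/henryloh0890/NEGES_2018 | corpus_SFU_Review_SP_NEG_task2/Model3/format_to_BIO_cue.py | parse_sent
-- ===== SOURCE A (Python) =====
-- import string
--
-- def clean(word):
-- 	x = word
-- 	x = x.replace('<scp>','')
-- 	x = x.replace('</scp>','')
-- 	x = x.replace('<dis>','')
-- 	x = x.replace('</dis>','')
-- 	return x
--
-- def parse_word (word,flag):
-- 	ori = clean(word)
-- 	if flag == "B":
-- 		ori = ori+"|B-C"
-- 	elif flag == "I":
-- 		ori = ori+"|I-C"
-- 	else:
-- 		ori = ori+"|O"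
-- 	return ori
--
-- def parse_sent (sentence):
-- 	s = sentence.split()
-- 	punc = [".","?",":","!",",",";"]
-- 	for id,x in enumerate(s):
-- 		if x[-1:] in punc and len(x) > 1:
-- 			s[id] = x[:-1]
-- 			s.insert(id+1,x[-1:])
-- 	res = ""
-- 	ins = False
-- 	flag = "O"
-- 	for id,w in enumerate(s):
-- 		if "<neg>" in w and "</neg>" in w:
-- 			ins = True
-- 			flag = "B"
-- 			s[id] = parse_word(w,flag)
-- 			s[id]  = s[id] .replace('<neg>','')
-- 			s[id]  = s[id] .replace('</neg>','')
-- 			flag = "O"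
-- 			ins  = False
-- 		elif "<neg>" in w:
-- 			ins = True
-- 			flag = "B"
-- 			s[id] = parse_word(w,flag)
-- 			s[id]  = s[id] .replace('<neg>','')
-- 		elif ins and not "</neg>" in w:
-- 			flag = "I"
-- 			s[id] = parse_word(w,flag)
-- 			s[id]  = s[id] .replace('</neg>','')
-- 		elif ins and "</neg>" in w:
-- 			flag = "I"
-- 			s[id] = parse_word(w,flag)
-- 			s[id]  = s[id] .replace('</neg>','')
-- 			ins = False
-- 			flag = "O"
-- 		else:
-- 			s[id] = parse_word(w,flag)
--
-- 	for i in s: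
-- 		if i in string.punctuation:
-- 			res = res + i
-- 		else:
-- 			res = res+" "+i
--
-- 	return res.strip()
-- ===== SOURCE B (Python) =====
-- PUNC = ".?:!,;"
-- TAGS = ("<scp>", "</scp>", "<dis>", "</dis>")
--
--
-- def _strip_tags(w):
--     for t in TAGS:
--         w = w.replace(t, "")
--     return w
--
--
-- def parse_sent(sentence):
--     tokens = []
--     for t in sentence.split():
--         if len(t) > 1 and t[-1] in PUNC:
--             tokens.append(t[:-1])
--             tokens.append(t[-1])
--         else:
--             tokens.append(t)
--     out = []
--     inside = False
--     for w in tokens: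
--         has_open = "<neg>" in w
--         has_close = "</neg>" in w
--         if has_open:
--             tagged = (_strip_tags(w) + "|B-C").replace("<neg>", "")
--             if has_close:
--                 tagged = tagged.replace("</neg>", "")
--             out.append(tagged)
--             inside = not has_close
--         elif inside:
--             out.append((_strip_tags(w) + "|I-C").replace("</neg>", ""))
--             inside = not has_close
--         else:
--             out.append(_strip_tags(w) + "|O")
--     return " ".join(out)
-- ===== Notes on version B (the rewrite author's own statement) =====
-- stated objective: simpler
-- what changed: B replaces A's in-place mutation (inserting split-off punctuation into the list while enumerating it, rewriting s[id] per branch, and a character-appending join loop whose punctuation branch is dead) with two passes that build fresh lists - a tokenizer that appends token/punctuation pairs and a state-machine emitter with a single inside flag - finished by a plain space-join; this also avoids the worst-case quadratic cost of list.insert.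
import Mathlib
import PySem

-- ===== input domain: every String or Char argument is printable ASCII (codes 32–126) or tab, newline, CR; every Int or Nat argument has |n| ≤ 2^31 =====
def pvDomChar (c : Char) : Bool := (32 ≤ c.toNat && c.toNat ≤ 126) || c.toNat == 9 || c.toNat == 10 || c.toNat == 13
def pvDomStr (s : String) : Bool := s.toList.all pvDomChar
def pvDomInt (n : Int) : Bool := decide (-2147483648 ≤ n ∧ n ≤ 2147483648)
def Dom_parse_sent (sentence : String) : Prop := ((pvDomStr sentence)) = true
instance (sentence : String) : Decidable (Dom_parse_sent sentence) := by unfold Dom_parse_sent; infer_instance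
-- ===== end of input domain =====

-- B rebuilds the token list with two clean passes and a plain " ".join instead of A's
-- in-place list mutation during enumeration and its (dead) punctuation-joining loop: simpler decomposition.

-- ===== PORT A =====
def pvA_clean (word : List Char) : List Char :=
  let x := word
  let x := PySem.Chars.replace x "<scp>".toList []
  let x := PySem.Chars.replace x "</scp>".toList []
  let x := PySem.Chars.replace x "<dis>".toList []
  let x := PySem.Chars.replace x "</dis>".toList []
  x

def pvA_parse_word (word flag : List Char) : List Char :=
  let ori := pvA_clean word
  if flag = "B".toList then ori ++ "|B-C".toList
  else if flag = "I".toList then ori ++ "|I-C".toList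
  else ori ++ "|O".toList

def pvA_punc : List (List Char) := [".".toList, "?".toList, ":".toList, "!".toList, ",".toList, ";".toList]

-- Python's `for id,x in enumerate(s)` iterates the LIVE list while `s.insert(id+1,…)` grows it:
-- index-based loop; the fuel bound 2·len+1 strictly exceeds the number of iterations (≤ 2·len).
def pvA_loop1 : Nat → List (List Char) → Nat → List (List Char)
  | 0, s, _ => s
  | fuel+1, s, id =>
    if id < s.length then
      let x := s.getD id []
      if PySem.List.slice x (some (-1)) none ∈ pvA_punc ∧ 1 < x.length then
        pvA_loop1 fuel
          (PySem.List.insert (s.set id (PySem.List.slice x none (some (-1)))) (((id + 1 : Nat)) : Int)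
            (PySem.List.slice x (some (-1)) none)) (id+1)
      else pvA_loop1 fuel s (id+1)
    else s

def pvA_loop2 (s : List (List Char)) (id : Nat) (ins : Bool) (flag : List Char) : List (List Char) :=
  if id < s.length then
    let w := s.getD id []
    if PySem.Chars.isIn "<neg>".toList w && PySem.Chars.isIn "</neg>".toList w then
      pvA_loop2 (s.set id (PySem.Chars.replace (PySem.Chars.replace (pvA_parse_word w "B".toList) "<neg>".toList []) "</neg>".toList [])) (id+1) false "O".toList
    else if PySem.Chars.isIn "<neg>".toList w then
      pvA_loop2 (s.set id (PySem.Chars.replace (pvA_parse_word w "B".toList) "<neg>".toList [])) (id+1) true "B".toList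
    else if ins && !(PySem.Chars.isIn "</neg>".toList w) then
      pvA_loop2 (s.set id (PySem.Chars.replace (pvA_parse_word w "I".toList) "</neg>".toList [])) (id+1) true "I".toList
    else if ins && PySem.Chars.isIn "</neg>".toList w then
      pvA_loop2 (s.set id (PySem.Chars.replace (pvA_parse_word w "I".toList) "</neg>".toList [])) (id+1) false "O".toList
    else
      pvA_loop2 (s.set id (pvA_parse_word w flag)) (id+1) ins flag
  else s
termination_by s.length - id
decreasing_by all_goals simp_all; omega

def pvA_punctuation : List Char := "!\"#$%&'()*+,-./:;<=>?@[\\]^_`{|}~".toList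

def parse_sent (sentence : String) : String :=
  let s := PySem.Chars.split₀ sentence.toList
  let s := pvA_loop1 (2 * s.length + 1) s 0
  let s := pvA_loop2 s 0 false "O".toList
  let res := s.foldl (fun res i => if PySem.Chars.isIn i pvA_punctuation then res ++ i else res ++ (' ' :: i)) []
  String.ofList (PySem.Chars.strip res)

-- ===== PORT B =====
def pvB_PUNC : List Char := ".?:!,;".toList

def pvB_TAGS : List (List Char) := ["<scp>".toList, "</scp>".toList, "<dis>".toList, "</dis>".toList]

def pvB_stripTags (w : List Char) : List Char :=
  pvB_TAGS.foldl (fun w t => PySem.Chars.replace w t []) w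

def pvB_tokenize : List (List Char) → List (List Char)
  | [] => []
  | t :: rest =>
    (if 1 < t.length then
       match PySem.List.pyGet? t (-1) with
       | some c => if PySem.Chars.isIn [c] pvB_PUNC then [PySem.List.slice t none (some (-1)), [c]] else [t]
       | none => [t]
     else [t]) ++ pvB_tokenize rest

def pvB_emit : List (List Char) → Bool → List (List Char)
  | [], _ => []
  | w :: rest, inside =>
    let hasOpen := PySem.Chars.isIn "<neg>".toList w
    let hasClose := PySem.Chars.isIn "</neg>".toList w
    if hasOpen then
      let tagged := PySem.Chars.replace (pvB_stripTags w ++ "|B-C".toList) "<neg>".toList []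
      let tagged := if hasClose then PySem.Chars.replace tagged "</neg>".toList [] else tagged
      tagged :: pvB_emit rest (!hasClose)
    else if inside then
      (PySem.Chars.replace (pvB_stripTags w ++ "|I-C".toList) "</neg>".toList []) :: pvB_emit rest (!hasClose)
    else
      (pvB_stripTags w ++ "|O".toList) :: pvB_emit rest inside

def parse_sent_alt (sentence : String) : String :=
  String.ofList (PySem.Chars.join [' '] (pvB_emit (pvB_tokenize (PySem.Chars.split₀ sentence.toList)) false))

-- ===== PRECONDITION & SPEC =====
def Spec_parse_sent (sentence : String) (out : String) : Prop := out = parse_sent_alt sentence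
instance (sentence : String) (out : String) : Decidable (Spec_parse_sent sentence out) := by unfold Spec_parse_sent; infer_instance

-- ===== CLAIM =====
def Claim_equal_parse_sent : Prop := ∀ (sentence : String), Dom_parse_sent sentence → Spec_parse_sent sentence (parse_sent sentence)

-- ===== LEMMAS AND PROOFS =====
set_option maxRecDepth 4096

-- replace with empty replacement only deletes occurrences of `old`: chars only disappear, never appear
lemma pv_mem_replace_go {c : Char} (old : List Char) :
    ∀ (fuel : Nat) (l acc : List Char), c ∈ PySem.Chars.replace.go old [] fuel l acc → c ∈ acc ∨ c ∈ l := by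
  intro fuel
  induction fuel with
  | zero => intro l acc h; simp only [PySem.Chars.replace.go] at h; simp at h ⊢; tauto
  | succ f ih =>
    intro l acc h
    cases l with
    | nil => simp only [PySem.Chars.replace.go] at h; simp at h ⊢; tauto
    | cons c' t =>
      simp only [PySem.Chars.replace.go] at h
      split at h
      · rcases ih _ _ h with h' | h'
        · simp at h'; tauto
        · right; exact List.mem_of_mem_drop h'
      · rcases ih _ _ h with h' | h'
        · simp at h' ⊢; tauto
        · simp; tauto

-- and a char not occurring in `old` survives the deletion
lemma pv_replace_go_mem {c : Char} (old : List Char) (hc : c ∉ old) :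
    ∀ (fuel : Nat) (l acc : List Char), (c ∈ acc ∨ c ∈ l) → c ∈ PySem.Chars.replace.go old [] fuel l acc := by
  intro fuel
  induction fuel with
  | zero => intro l acc h; simp only [PySem.Chars.replace.go]; simp; tauto
  | succ f ih =>
    intro l acc h
    cases l with
    | nil =>
      simp only [PySem.Chars.replace.go]; simp
      rcases h with h | h
      · exact h
      · simp at h
    | cons c' t =>
      simp only [PySem.Chars.replace.go]
      split
      · rename_i hpre
        apply ih
        rcases h with h | h
        · left; simpa using h
        · right
          have hp : old <+: (c' :: t) := List.isPrefixOf_iff_prefix.mp hpre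
          obtain ⟨u, hu⟩ := hp
          rw [← hu, List.drop_left' rfl]
          rw [← hu] at h
          rcases List.mem_append.mp h with h | h
          · exact absurd h hc
          · exact h
      · apply ih
        rcases h with h | h
        · left; simp; tauto
        · rcases List.mem_cons.mp h with h | h
          · left; simp [h]
          · right; exact h

lemma pv_mem_replace {c : Char} {l old : List Char} (h : c ∈ PySem.Chars.replace l old []) : c ∈ l := by
  unfold PySem.Chars.replace at h
  split at h
  · rename_i he
    simp at he
    simpa [he] using h
  · rcases pv_mem_replace_go old _ _ _ h with h' | h'
    · simp at h'
    · exact h' 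

lemma pv_replace_mem {c : Char} {l : List Char} (old : List Char) (h : c ∈ l) (hc : c ∉ old) :
    c ∈ PySem.Chars.replace l old [] := by
  unfold PySem.Chars.replace
  split
  · rename_i he
    simp at he
    simpa [he] using h
  · exact pv_replace_go_mem old hc _ _ _ (Or.inr h)

lemma pv_mem_stripTags {c : Char} {w : List Char} (h : c ∈ pvB_stripTags w) : c ∈ w := by
  simp only [pvB_stripTags, pvB_TAGS, List.foldl] at h
  exact pv_mem_replace (pv_mem_replace (pv_mem_replace (pv_mem_replace h)))

lemma pv_split₀_go_nonspace :
    ∀ (l cur : List Char) (acc : List (List Char)),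
      (∀ c ∈ cur, PySem.Chars.isspace c = false) →
      (∀ w ∈ acc, ∀ c ∈ w, PySem.Chars.isspace c = false) →
      ∀ w ∈ PySem.Chars.split₀.go l cur acc, ∀ c ∈ w, PySem.Chars.isspace c = false := by
  intro l
  induction l with
  | nil =>
    intro cur acc hcur hacc w hw
    simp only [PySem.Chars.split₀.go] at hw
    split at hw
    · simp at hw
      exact hacc w hw
    · simp at hw
      rcases hw with hw | hw
      · exact hacc w hw
      · subst hw
        intro c hc
        exact hcur c (by simpa using hc)
  | cons c' rest ih =>
    intro cur acc hcur hacc w hw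
    simp only [PySem.Chars.split₀.go] at hw
    split at hw
    · split at hw
      · exact ih [] acc (by simp) hacc w hw
      · refine ih [] (cur.reverse :: acc) (by simp) ?_ w hw
        intro w' hw' c hc
        rcases List.mem_cons.mp hw' with h | h
        · subst h; exact hcur c (by simpa using hc)
        · exact hacc w' h c hc
    · rename_i hsp
      refine ih (c' :: cur) acc ?_ hacc w hw
      intro c hc
      rcases List.mem_cons.mp hc with h | h
      · subst h; simpa using hsp
      · exact hcur c h

lemma pv_split₀_nonspace (s : List Char) :
    ∀ w ∈ PySem.Chars.split₀ s, ∀ c ∈ w, PySem.Chars.isspace c = false := by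
  intro w hw
  exact pv_split₀_go_nonspace s [] [] (by simp) (by simp) w hw

lemma pv_slice_last (x : List Char) (h : x ≠ []) :
    PySem.List.slice x (some (-1)) none = [x.getLast h] := by
  induction x using List.reverseRecOn with
  | nil => simp at h
  | append_singleton ys a ih =>
    simp [PySem.List.slice, PySem.List.clampIdx]
    split <;> omega

lemma pv_slice_dropLast (x : List Char) :
    PySem.List.slice x none (some (-1)) = x.dropLast := by
  cases x using List.reverseRecOn with
  | nil => simp [PySem.List.slice, PySem.List.clampIdx]
  | append_singleton ys a =>
    simp [PySem.List.slice, PySem.List.clampIdx]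

lemma pv_pyGet_last (x : List Char) (h : x ≠ []) :
    PySem.List.pyGet? x (-1) = some (x.getLast h) := by
  cases x using List.reverseRecOn with
  | nil => simp at h
  | append_singleton ys a =>
    simp [PySem.List.pyGet?, PySem.List.pyIdx?]

lemma pv_insert_nat {α : Type} (l : List α) (k : Nat) (v : α) (h : k ≤ l.length) :
    PySem.List.insert l (k : Int) v = l.take k ++ v :: l.drop k := by
  simp [PySem.List.insert, PySem.List.sliceIndices]
  split <;> rename_i h2
  · omega
  · rw [show (min (k:Int) (l.length:Int)).toNat = k by omega]

lemma pv_mem_punc_iff (c : Char) :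
    (([c] : List Char) ∈ pvA_punc) ↔ PySem.Chars.isIn [c] pvB_PUNC = true := by
  rw [PySem.Chars.isIn_iff_infix, List.singleton_infix_iff]
  have h1 : pvB_PUNC = ['.','?',':','!',',',';'] := rfl
  have h2 : pvA_punc = [['.'],['?'],[':'],['!'],[','],[';']] := rfl
  rw [h1, h2]
  simp

lemma pv_clean_eq (w : List Char) : pvA_clean w = pvB_stripTags w := by
  simp [pvA_clean, pvB_stripTags, pvB_TAGS, List.foldl]

lemma pv_tokenize_mem {P : Char → Prop} :
    ∀ (ts : List (List Char)), (∀ t ∈ ts, ∀ c ∈ t, P c) →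
      ∀ t ∈ pvB_tokenize ts, ∀ c ∈ t, P c := by
  intro ts
  induction ts with
  | nil => intro _ t ht; simp [pvB_tokenize] at ht
  | cons t0 rest ih =>
    intro hts t ht
    have h0 : ∀ c ∈ t0, P c := hts t0 (by simp)
    simp only [pvB_tokenize, List.mem_append] at ht
    rcases ht with ht | ht
    · split at ht
      · split at ht
        · rename_i a heq
          split at ht
          · simp at ht
            rcases ht with ht | ht
            · subst ht
              intro c hc
              rw [pv_slice_dropLast] at hc
              exact h0 c ((List.dropLast_sublist _).subset hc)
            · subst ht
              intro c hc
              simp at hc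
              subst hc
              apply h0
              simp only [PySem.List.pyGet?] at heq
              obtain ⟨k, -, hk⟩ := Option.bind_eq_some_iff.mp heq
              exact List.mem_of_getElem? hk
          · simp at ht; subst ht; exact h0
        · simp at ht; subst ht; exact h0
      · simp at ht; subst ht; exact h0
    · exact ih (fun u hu => hts u (by simp [hu])) t ht

lemma pv_emit_nonspace :
    ∀ (l : List (List Char)) (ins : Bool), (∀ t ∈ l, ∀ c ∈ t, PySem.Chars.isspace c = false) →
      ∀ w ∈ pvB_emit l ins, ∀ c ∈ w, PySem.Chars.isspace c = false := by
  intro l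
  induction l with
  | nil => intro ins _ w hw; simp [pvB_emit] at hw
  | cons w0 rest ih =>
    intro ins hl w hw
    have h0 : ∀ c ∈ w0, PySem.Chars.isspace c = false := hl w0 (by simp)
    have hBC : ∀ c ∈ "|B-C".toList, PySem.Chars.isspace c = false := by intro c hc; fin_cases hc <;> rfl
    have hIC : ∀ c ∈ "|I-C".toList, PySem.Chars.isspace c = false := by intro c hc; fin_cases hc <;> rfl
    have hO : ∀ c ∈ "|O".toList, PySem.Chars.isspace c = false := by intro c hc; fin_cases hc <;> rfl
    have htail : ∀ t ∈ rest, ∀ c ∈ t, PySem.Chars.isspace c = false :=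
      fun u hu => hl u (by simp [hu])
    simp only [pvB_emit] at hw
    split at hw
    · rcases List.mem_cons.mp hw with hw | hw
      · subst hw
        intro c hc
        split at hc
        · have hc2 := pv_mem_replace (pv_mem_replace hc)
          rcases List.mem_append.mp hc2 with h | h
          · exact h0 c (pv_mem_stripTags h)
          · exact hBC c h
        · have hc2 := pv_mem_replace hc
          rcases List.mem_append.mp hc2 with h | h
          · exact h0 c (pv_mem_stripTags h)
          · exact hBC c h
      · exact ih _ htail w hw
    · split at hw
      · rcases List.mem_cons.mp hw with hw | hw
        · subst hw
          intro c hc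
          have hc2 := pv_mem_replace hc
          rcases List.mem_append.mp hc2 with h | h
          · exact h0 c (pv_mem_stripTags h)
          · exact hIC c h
        · exact ih _ htail w hw
      · rcases List.mem_cons.mp hw with hw | hw
        · subst hw
          intro c hc
          rcases List.mem_append.mp hc with h | h
          · exact h0 c (pv_mem_stripTags h)
          · exact hO c h
        · exact ih _ htail w hw

lemma pv_emit_letter :
    ∀ (l : List (List Char)) (ins : Bool), ∀ w ∈ pvB_emit l ins, ('C' ∈ w ∨ 'O' ∈ w) := by
  intro l
  induction l with
  | nil => intro ins w hw; simp [pvB_emit] at hw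
  | cons w0 rest ih =>
    intro ins w hw
    have hCopen : ('C' : Char) ∉ "<neg>".toList := by decide
    have hCclose : ('C' : Char) ∉ "</neg>".toList := by decide
    simp only [pvB_emit] at hw
    split at hw
    · rcases List.mem_cons.mp hw with hw | hw
      · subst hw
        left
        split
        · exact pv_replace_mem _ (pv_replace_mem _ (List.mem_append_right _ (by decide)) hCopen) hCclose
        · exact pv_replace_mem _ (List.mem_append_right _ (by decide)) hCopen
      · exact ih _ w hw
    · split at hw
      · rcases List.mem_cons.mp hw with hw | hw
        · subst hw
          left
          exact pv_replace_mem _ (List.mem_append_right _ (by decide)) hCclose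
        · exact ih _ w hw
      · rcases List.mem_cons.mp hw with hw | hw
        · subst hw
          exact Or.inr (List.mem_append_right _ (by decide))
        · exact ih _ w hw

lemma pv_isIn_punct_false (w : List Char) (h : 'C' ∈ w ∨ 'O' ∈ w) :
    PySem.Chars.isIn w pvA_punctuation = false := by
  rw [PySem.Chars.isIn_eq_false_iff]
  intro hinf
  have hsub := hinf.sublist.subset
  rcases h with h | h
  · have hm := hsub h
    have : ('C' : Char) ∉ pvA_punctuation := by decide
    exact this hm
  · have hm := hsub h
    have : ('O' : Char) ∉ pvA_punctuation := by decide
    exact this hm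

lemma pv_take_set {α : Type} (s : List α) (id : Nat) (v : α) (h : id < s.length) :
    (s.set id v).take (id+1) = s.take id ++ [v] := by
  rw [List.set_eq_take_append_cons_drop, if_pos h]
  rw [show id + 1 = (s.take id).length + 1 by simp [List.length_take]; omega]
  rw [List.take_append]
  simp

lemma pv_drop_set {α : Type} (s : List α) (id : Nat) (v : α) (h : id < s.length) :
    (s.set id v).drop (id+1) = s.drop (id+1) := by
  rw [List.set_eq_take_append_cons_drop, if_pos h]
  rw [show id + 1 = (s.take id).length + 1 by simp [List.length_take]; omega]
  rw [List.drop_append]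
  simp

lemma pv_tokHead (x : List Char) (r : List (List Char)) :
    pvB_tokenize (x :: r) =
      (if PySem.List.slice x (some (-1)) none ∈ pvA_punc ∧ 1 < x.length
       then [PySem.List.slice x none (some (-1)), PySem.List.slice x (some (-1)) none]
       else [x]) ++ pvB_tokenize r := by
  by_cases hlen : 1 < x.length
  · have hne : x ≠ [] := by intro h0; subst h0; simp at hlen
    have hget := pv_pyGet_last x hne
    have hsl := pv_slice_last x hne
    simp only [pvB_tokenize, hget, if_pos hlen]
    by_cases hmem : ([x.getLast hne] : List Char) ∈ pvA_punc
    · rw [if_pos ((pv_mem_punc_iff _).mp hmem), if_pos ⟨by rw [hsl]; exact hmem, hlen⟩, hsl]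
    · rw [if_neg (fun hc => hmem ((pv_mem_punc_iff _).mpr hc)),
          if_neg (fun hc => hmem (by rw [← hsl]; exact hc.1))]
  · simp only [pvB_tokenize, if_neg hlen]
    rw [if_neg (fun hc => hlen hc.2)]

lemma pv_loop1_eq :
    ∀ (n : Nat) (s : List (List Char)) (id fuel : Nat),
      s.length - id ≤ n → 2 * (s.length - id) ≤ fuel →
      pvA_loop1 fuel s id = s.take id ++ pvB_tokenize (s.drop id) := by
  intro n
  induction n with
  | zero =>
    intro s id fuel h1 h2
    have hid : s.length ≤ id := by omega
    have hA : pvA_loop1 fuel s id = s := by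
      cases fuel with
      | zero => rfl
      | succ f => simp only [pvA_loop1]; rw [if_neg (by omega)]
    rw [hA, List.drop_eq_nil_of_le hid, List.take_of_length_le hid]
    simp [pvB_tokenize]
  | succ n ih =>
    intro s id fuel h1 h2
    by_cases hid : id < s.length
    case neg =>
      have hid' : s.length ≤ id := by omega
      have hA : pvA_loop1 fuel s id = s := by
        cases fuel with
        | zero => rfl
        | succ f => simp only [pvA_loop1]; rw [if_neg (by omega)]
      rw [hA, List.drop_eq_nil_of_le hid', List.take_of_length_le hid']
      simp [pvB_tokenize]
    case pos =>
      obtain ⟨f, rfl⟩ : ∃ f, fuel = f + 1 := ⟨fuel - 1, by omega⟩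
      simp only [pvA_loop1]
      rw [if_pos hid]
      have hgetD : s.getD id [] = s[id] := List.getD_eq_getElem s [] hid
      have hdrop : s.drop id = s[id] :: s.drop (id+1) := List.drop_eq_getElem_cons hid
      by_cases hcond : PySem.List.slice (s.getD id []) (some (-1)) none ∈ pvA_punc ∧ 1 < (s.getD id []).length
      · rw [if_pos hcond]
        have hne : s.getD id [] ≠ [] := by
          intro h0; rw [h0] at hcond; simp at hcond
        rw [pv_insert_nat _ _ _ (by simp [List.length_set]; omega)]
        rw [pv_take_set _ _ _ hid, pv_drop_set _ _ _ hid]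
        obtain ⟨g, rfl⟩ : ∃ g, f = g + 1 := ⟨f - 1, by omega⟩
        simp only [pvA_loop1]
        have hlen1 : (s.take id).length = id := by simp [List.length_take]; omega
        have hlen2 : ((s.take id ++ [PySem.List.slice (s.getD id []) none (some (-1))]) ++
            PySem.List.slice (s.getD id []) (some (-1)) none :: s.drop (id+1)).length = s.length + 1 := by
          simp [List.length_append, hlen1, List.length_drop]; omega
        rw [if_pos (by rw [hlen2]; omega)]
        have hget1 : ((s.take id ++ [PySem.List.slice (s.getD id []) none (some (-1))]) ++
            PySem.List.slice (s.getD id []) (some (-1)) none :: s.drop (id+1)).getD (id+1) []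
            = PySem.List.slice (s.getD id []) (some (-1)) none := by
          rw [List.getD_eq_getElem _ _ (by rw [hlen2]; omega)]
          rw [List.getElem_append_right (by simp [hlen1])]
          simp [hlen1]
        rw [hget1]
        have hp1 : (PySem.List.slice (s.getD id []) (some (-1)) none).length = 1 := by
          rw [pv_slice_last _ hne]; rfl
        rw [if_neg (by rw [hp1]; intro hc; omega)]
        rw [ih _ (id+2) g (by rw [hlen2]; omega) (by rw [hlen2]; omega)]
        have ht2 : ((s.take id ++ [PySem.List.slice (s.getD id []) none (some (-1))]) ++
            PySem.List.slice (s.getD id []) (some (-1)) none :: s.drop (id+1)).take (id+2)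
            = s.take id ++ [PySem.List.slice (s.getD id []) none (some (-1)),
                PySem.List.slice (s.getD id []) (some (-1)) none] := by
          rw [List.take_append]
          rw [List.take_of_length_le (by simp [hlen1])]
          rw [show id + 2 - ((s.take id ++ [PySem.List.slice (s.getD id []) none (some (-1))]).length) = 1
              by simp [hlen1]]
          simp
        have hd2 : ((s.take id ++ [PySem.List.slice (s.getD id []) none (some (-1))]) ++
            PySem.List.slice (s.getD id []) (some (-1)) none :: s.drop (id+1)).drop (id+2)
            = s.drop (id+1) := by
          rw [List.drop_append, List.drop_eq_nil_of_le (by simp [hlen1])]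
          rw [show id + 2 - ((s.take id ++ [PySem.List.slice (s.getD id []) none (some (-1))]).length) = 1
              by simp [hlen1]]
          simp
        rw [ht2, hd2, hdrop, pv_tokHead]
        rw [← hgetD, if_pos hcond]
        simp
      · rw [if_neg hcond]
        rw [ih s (id+1) f (by omega) (by omega)]
        rw [hdrop, pv_tokHead, ← hgetD, if_neg hcond]
        have hts : s.take (id+1) = s.take id ++ [s[id]] := by
          rw [List.take_add_one, List.getElem?_eq_getElem hid]; rfl
        rw [hts, List.append_assoc, List.singleton_append, hgetD]; rfl

lemma pv_parse_word_B (w : List Char) :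
    pvA_parse_word w "B".toList = pvB_stripTags w ++ "|B-C".toList := by
  simp [pvA_parse_word, pv_clean_eq]

lemma pv_parse_word_I (w : List Char) :
    pvA_parse_word w "I".toList = pvB_stripTags w ++ "|I-C".toList := by
  simp only [pvA_parse_word]
  rw [if_neg (show ¬("I".toList = "B".toList) by decide)]
  simp [pv_clean_eq]

lemma pv_parse_word_O (w : List Char) :
    pvA_parse_word w "O".toList = pvB_stripTags w ++ "|O".toList := by
  simp only [pvA_parse_word]
  rw [if_neg (show ¬("O".toList = "B".toList) by decide), if_neg (show ¬("O".toList = "I".toList) by decide)]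
  simp [pv_clean_eq]

lemma pv_loop2_eq :
    ∀ (n : Nat) (s : List (List Char)) (id : Nat) (ins : Bool) (flag : List Char),
      s.length - id ≤ n → (ins = false → flag = "O".toList) →
      pvA_loop2 s id ins flag = s.take id ++ pvB_emit (s.drop id) ins := by
  intro n
  induction n with
  | zero =>
    intro s id ins flag h1 hf
    have hid : s.length ≤ id := by omega
    rw [pvA_loop2, if_neg (by omega), List.drop_eq_nil_of_le hid, List.take_of_length_le hid]
    simp [pvB_emit]
  | succ n ih =>
    intro s id ins flag h1 hf
    by_cases hid : id < s.length
    case neg =>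
      have hid' : s.length ≤ id := by omega
      rw [pvA_loop2, if_neg (by omega), List.drop_eq_nil_of_le hid', List.take_of_length_le hid']
      simp [pvB_emit]
    case pos =>
      have hgetD : s.getD id [] = s[id] := List.getD_eq_getElem s [] hid
      have hdrop : s.drop id = s[id] :: s.drop (id+1) := List.drop_eq_getElem_cons hid
      have hlen : ∀ v : List Char, (s.set id v).length - (id+1) ≤ n := by
        intro v; simp only [List.length_set]; omega
      rw [pvA_loop2, if_pos hid, hgetD, hdrop]
      cases hO : PySem.Chars.isIn "<neg>".toList s[id] <;>
        cases hC : PySem.Chars.isIn "</neg>".toList s[id]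
      case true.true =>
        simp only [hO, hC, Bool.and_self, if_pos rfl]
        rw [ih _ (id+1) false "O".toList (hlen _) (fun _ => rfl)]
        rw [pv_take_set _ _ _ hid, pv_drop_set _ _ _ hid]
        simp only [pvB_emit, hO, hC, if_true, Bool.not_true, pv_parse_word_B]
        simp [List.append_assoc]
      case true.false =>
        simp only [hO, hC, Bool.true_and, Bool.and_false, Bool.false_eq_true, if_false, if_pos rfl]
        rw [ih _ (id+1) true "B".toList (hlen _) (by intro h; cases h)]
        rw [pv_take_set _ _ _ hid, pv_drop_set _ _ _ hid]
        simp only [pvB_emit, hO, hC, if_true, Bool.not_false, pv_parse_word_B]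
        simp [List.append_assoc]
      case false.true =>
        cases ins
        case false =>
          rw [hf rfl]
          simp only [hO, hC, Bool.false_and, Bool.and_true, Bool.false_eq_true, if_false,
            Bool.not_true, Bool.and_false]
          rw [ih _ (id+1) false "O".toList (hlen _) (fun _ => rfl)]
          rw [pv_take_set _ _ _ hid, pv_drop_set _ _ _ hid]
          simp only [pvB_emit, hO, hC, Bool.false_eq_true, if_false, pv_parse_word_O]
          simp [List.append_assoc]
        case true =>
          simp only [hO, hC, Bool.false_and, Bool.true_and, Bool.false_eq_true, if_false,
            Bool.not_true, Bool.and_false, Bool.and_true, if_pos rfl]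
          rw [ih _ (id+1) false "O".toList (hlen _) (fun _ => rfl)]
          rw [pv_take_set _ _ _ hid, pv_drop_set _ _ _ hid]
          simp only [pvB_emit, hO, hC, Bool.false_eq_true, if_false, if_true, Bool.not_true,
            pv_parse_word_I]
          simp [List.append_assoc]
      case false.false =>
        cases ins
        case false =>
          rw [hf rfl]
          simp only [hO, hC, Bool.false_and, Bool.and_false, Bool.false_eq_true, if_false]
          rw [ih _ (id+1) false "O".toList (hlen _) (fun _ => rfl)]
          rw [pv_take_set _ _ _ hid, pv_drop_set _ _ _ hid]
          simp only [pvB_emit, hO, hC, Bool.false_eq_true, if_false, pv_parse_word_O]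
          simp [List.append_assoc]
        case true =>
          simp only [hO, hC, Bool.false_and, Bool.true_and, Bool.not_false, Bool.and_true,
            Bool.false_eq_true, if_false, if_pos rfl]
          rw [ih _ (id+1) true "I".toList (hlen _) (by intro h; cases h)]
          rw [pv_take_set _ _ _ hid, pv_drop_set _ _ _ hid]
          simp only [pvB_emit, hO, hC, Bool.false_eq_true, if_false, if_true, Bool.not_false,
            pv_parse_word_I]
          simp [List.append_assoc]

lemma pv_foldl_join :
    ∀ (l : List (List Char)) (res : List Char), (∀ i ∈ l, PySem.Chars.isIn i pvA_punctuation = false) →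
      l.foldl (fun res i => if PySem.Chars.isIn i pvA_punctuation then res ++ i else res ++ (' ' :: i)) res
        = res ++ l.flatMap (fun i => ' ' :: i) := by
  intro l
  induction l with
  | nil => intro res _; simp
  | cons w rest ih =>
    intro res h
    have hw : PySem.Chars.isIn w pvA_punctuation = false := h w (by simp)
    simp only [List.foldl_cons, hw, Bool.false_eq_true, if_false, List.flatMap_cons]
    rw [ih _ (fun i hi => h i (by simp [hi]))]
    simp [List.append_assoc]

lemma pv_join_cons (w : List Char) (rest : List (List Char)) :
    PySem.Chars.join [' '] (w :: rest) = w ++ rest.flatMap (fun i => ' ' :: i) := by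
  induction rest generalizing w with
  | nil => simp [PySem.Chars.join, List.intercalate]
  | cons w2 rs ih =>
    simp only [PySem.Chars.join, List.intercalate] at ih ⊢
    rw [List.intersperse_cons₂]
    simp only [List.flatten_cons]
    rw [show (List.intersperse [' '] (w2 :: rs)).flatten = w2 ++ rs.flatMap (fun i => ' ' :: i) from ih w2]
    simp [List.append_assoc]

lemma pv_strip_cons_space (j : List Char)
    (hhd : ∀ c, j.head? = some c → PySem.Chars.isspace c = false)
    (hlast : ∀ c, j.getLast? = some c → PySem.Chars.isspace c = false) :
    PySem.Chars.strip (' ' :: j) = j := by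
  show PySem.Chars.rstrip (PySem.Chars.lstrip (' ' :: j)) = j
  rw [PySem.Chars.lstrip, List.dropWhile_cons_of_pos (by rfl)]
  have hj : List.dropWhile PySem.Chars.isspace j = j := by
    cases j with
    | nil => rfl
    | cons c t => rw [List.dropWhile_cons_of_neg (by simp [hhd c rfl])]
  rw [hj, PySem.Chars.rstrip]
  have hr : List.dropWhile PySem.Chars.isspace j.reverse = j.reverse := by
    cases hrv : j.reverse with
    | nil => rfl
    | cons c t =>
      have : j.getLast? = some c := by
        rw [← List.head?_reverse, hrv]; rfl
      rw [List.dropWhile_cons_of_neg (by simp [hlast c this])]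
  rw [hr, List.reverse_reverse]

lemma pv_last_flat :
    ∀ (L : List (List Char)) (w : List Char),
      (∃ c, w.getLast? = some c ∧ PySem.Chars.isspace c = false) →
      (∀ u ∈ L, u ≠ [] ∧ ∀ c ∈ u, PySem.Chars.isspace c = false) →
      ∃ c, (w ++ L.flatMap (fun i => ' ' :: i)).getLast? = some c ∧ PySem.Chars.isspace c = false := by
  intro L
  induction L with
  | nil =>
    intro w hw _
    simpa using hw
  | cons w2 rs ih =>
    intro w hw hL
    have hw2 := hL w2 (by simp)
    rw [List.flatMap_cons, show w ++ ((' ' :: w2) ++ rs.flatMap (fun i => ' ' :: i))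
        = (w ++ (' ' :: w2)) ++ rs.flatMap (fun i => ' ' :: i) by simp [List.append_assoc]]
    apply ih
    · obtain ⟨c, hc⟩ : ∃ c, w2.getLast? = some c := Option.ne_none_iff_exists'.mp (by simpa using hw2.1)
      refine ⟨c, ?_, hw2.2 c (List.mem_of_getLast? hc)⟩
      rw [List.getLast?_append_of_ne_nil _ (by simp), show (' ' :: w2) = [' '] ++ w2 from rfl,
        List.getLast?_append_of_ne_nil _ hw2.1, hc]
    · intro u hu; exact hL u (by simp [hu])

lemma pv_emit_nonempty (l : List (List Char)) (ins : Bool) :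
    ∀ w ∈ pvB_emit l ins, w ≠ [] := by
  intro w hw h0
  rcases pv_emit_letter l ins w hw with h | h <;> rw [h0] at h <;> simp at h

-- ===== VERDICT =====
theorem parse_sent_spec : Claim_equal_parse_sent := by
  unfold Claim_equal_parse_sent
  intro sentence _
  simp only [Spec_parse_sent, parse_sent, parse_sent_alt]
  have hts := pv_split₀_nonspace sentence.toList
  set ts := PySem.Chars.split₀ sentence.toList with hts0
  rw [pv_loop1_eq ts.length ts 0 (2*ts.length+1) (by omega) (by omega)]
  simp only [List.take_zero, List.drop_zero, List.nil_append]
  rw [pv_loop2_eq (pvB_tokenize ts).length (pvB_tokenize ts) 0 false "O".toList (by omega) (fun _ => rfl)]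
  simp only [List.take_zero, List.drop_zero, List.nil_append]
  have htok : ∀ t ∈ pvB_tokenize ts, ∀ c ∈ t, PySem.Chars.isspace c = false := pv_tokenize_mem ts hts
  have hns : ∀ w ∈ pvB_emit (pvB_tokenize ts) false, ∀ c ∈ w, PySem.Chars.isspace c = false :=
    pv_emit_nonspace _ false htok
  have hne := pv_emit_nonempty (pvB_tokenize ts) false
  have hpf : ∀ i ∈ pvB_emit (pvB_tokenize ts) false, PySem.Chars.isIn i pvA_punctuation = false :=
    fun i hi => pv_isIn_punct_false i (pv_emit_letter (pvB_tokenize ts) false i hi)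
  rw [pv_foldl_join _ [] hpf]
  simp only [List.nil_append]
  cases hE : pvB_emit (pvB_tokenize ts) false with
  | nil => rfl
  | cons w rest =>
    rw [hE] at hns hne
    rw [pv_join_cons]
    rw [List.flatMap_cons, show ((' ' :: w) ++ rest.flatMap (fun i => ' ' :: i))
        = ' ' :: (w ++ rest.flatMap (fun i => ' ' :: i)) from rfl]
    rw [pv_strip_cons_space]
    · intro c hc
      have hwne : w ≠ [] := hne w (by simp)
      rw [List.head?_append_of_ne_nil _ hwne] at hc
      exact hns w (by simp) c (List.mem_of_mem_head? hc)
    · intro c hc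
      have hwne : w ≠ [] := hne w (by simp)
      obtain ⟨c0, hc0⟩ : ∃ c0, w.getLast? = some c0 := Option.ne_none_iff_exists'.mp (by simpa using hwne)
      obtain ⟨c1, hc1, hc2⟩ := pv_last_flat rest w
        ⟨c0, hc0, hns w (by simp) c0 (List.mem_of_getLast? hc0)⟩
        (fun u hu => ⟨hne u (by simp [hu]), hns u (by simp [hu])⟩)
      rw [hc1] at hc
      cases hc
      exact hc2
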